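-- pv_equiv track=rewrite | github.com/ahmetax/derlemtr | yeni_kelime_tara.py | check_consecutive_vowels
-- ===== SOURCE A (Python) =====
-- SESLI_HARFLER = set('aâeıiîoöuü')
--
-- def check_consecutive_vowels(word: str, max_vowels: int = 2) -> bool:
--     """
--     Kelimenin max_vowels'tan fazla ardışık ünlü içerip içermediğini kontrol eder.
--     Dönüş: True ise kurala aykırıdır (yani KÖTÜ), False ise uygundur (İYİ).
--     """
--     word_lower = word.lower()
--     consecutive_count = 0
--
--     for char in word_lower:
--         if char in SESLI_HARFLER:
--             consecutive_count += 1
--             if consecutive_count > max_vowels: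
--                 return True  # Üçüncü (ve daha fazlası) ardışık ünlü bulundu.
--         else:
--             consecutive_count = 0
--
--     return False
-- ===== SOURCE B (Python) =====
-- SESLI_HARFLER = set('aâeıiîoöuü')
--
-- def check_consecutive_vowels(word: str, max_vowels: int = 2) -> bool:
--     # Extract the maximal vowel runs explicitly, then check their lengths,
--     # instead of maintaining a resetting consecutive counter.
--     w = word.lower()
--     n = len(w)
--     run_lengths = []
--     i = 0
--     while i < n:
--         if w[i] in SESLI_HARFLER:
--             j = i + 1
--             while j < n and w[j] in SESLI_HARFLER:
--                 j += 1
--             run_lengths.append(j - i)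
--             i = j
--         else:
--             i += 1
--     return any(L > max_vowels for L in run_lengths)
-- ===== Notes on version B (the rewrite author's own statement) =====
-- stated objective: alternative
-- what changed: B extracts the maximal vowel runs of the lowercased word explicitly and then checks whether any run is longer than max_vowels, instead of A's single pass with a resetting consecutive counter and early return.
import Mathlib
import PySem

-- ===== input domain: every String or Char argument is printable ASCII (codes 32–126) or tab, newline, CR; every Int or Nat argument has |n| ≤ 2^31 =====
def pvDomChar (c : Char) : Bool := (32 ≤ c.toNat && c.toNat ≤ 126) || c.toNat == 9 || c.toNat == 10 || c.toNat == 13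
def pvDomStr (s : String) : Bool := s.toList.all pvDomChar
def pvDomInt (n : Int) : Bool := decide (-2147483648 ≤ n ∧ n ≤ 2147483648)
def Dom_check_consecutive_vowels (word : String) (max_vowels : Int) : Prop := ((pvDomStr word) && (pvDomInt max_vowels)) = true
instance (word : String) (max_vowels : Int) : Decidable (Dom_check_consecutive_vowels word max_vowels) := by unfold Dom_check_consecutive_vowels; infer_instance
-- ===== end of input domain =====

-- B extracts the maximal vowel runs explicitly and checks their lengths; A keeps a resetting counter (alternative decomposition, same cost).

-- ===== PORT A =====
def SESLI_HARFLER : PySem.Set Char := PySem.Set.ofList "aâeıiîoöuü".toList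

-- 'char in SESLI_HARFLER'
def pvIsVowel (c : Char) : Bool := PySem.Set.contains SESLI_HARFLER c

-- the 'for char in word_lower' loop with its resetting counter and early return
def pvLoopA (l : List Char) (consecutive_count : Int) (max_vowels : Int) : Bool :=
  match l with
  | [] => false
  | c :: rest =>
    if pvIsVowel c then
      if consecutive_count + 1 > max_vowels then true
      else pvLoopA rest (consecutive_count + 1) max_vowels
    else pvLoopA rest 0 max_vowels

def check_consecutive_vowels (word : String) (max_vowels : Int) : Bool :=
  pvLoopA (PySem.Str.lower word).toList 0 max_vowels

-- ===== PORT B =====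
-- the outer while loop: collect the length of each maximal vowel run
def pvRuns (l : List Char) : List Nat :=
  match l with
  | [] => []
  | c :: rest =>
    if pvIsVowel c then
      -- inner while: j advances over the following vowels
      ((rest.takeWhile (pvIsVowel)).length + 1)
        :: pvRuns (rest.dropWhile (pvIsVowel))
    else pvRuns rest
termination_by l.length
decreasing_by
  · exact Nat.lt_succ_of_le (List.length_dropWhile_le _ _)
  · simp

def check_consecutive_vowels_alt (word : String) (max_vowels : Int) : Bool :=
  (pvRuns (PySem.Str.lower word).toList).any (fun L => decide (max_vowels < (L : Int)))

-- ===== PRECONDITION & SPEC =====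
def Spec_check_consecutive_vowels (word : String) (max_vowels : Int) (out : Bool) : Prop := out = check_consecutive_vowels_alt word max_vowels
instance (word : String) (max_vowels : Int) (out : Bool) : Decidable (Spec_check_consecutive_vowels word max_vowels out) := by unfold Spec_check_consecutive_vowels; infer_instance

-- ===== CLAIM (what is proved, stated in full; the proofs are below) =====
def Claim_equal_check_consecutive_vowels : Prop := ∀ (word : String) (max_vowels : Int), Dom_check_consecutive_vowels word max_vowels → Spec_check_consecutive_vowels word max_vowels (check_consecutive_vowels word max_vowels)

-- ===== LEMMAS AND PROOFS =====

-- running maximum of the counter values A compares against max_vowels (base m: "no comparison made")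
def pvPeaks (m : Int) (l : List Char) (cnt : Int) : Int :=
  match l with
  | [] => m
  | c :: rest =>
    if pvIsVowel c then max (cnt + 1) (pvPeaks m rest (cnt + 1))
    else pvPeaks m rest 0

def pvMaxRuns (m : Int) (rs : List Nat) : Int :=
  rs.foldr (fun L a => max ((L : Int)) a) m

theorem pvLoopA_eq_peaks (m : Int) (l : List Char) (cnt : Int) :
    pvLoopA l cnt m = decide (m < pvPeaks m l cnt) := by
  induction l generalizing cnt with
  | nil => simp [pvLoopA, pvPeaks]
  | cons c rest ih =>
    simp only [pvLoopA, pvPeaks]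
    split
    · by_cases h : cnt + 1 > m
      · have : m < max (cnt + 1) (pvPeaks m rest (cnt + 1)) := lt_max_of_lt_left h
        simp [h, this]
      · simp only [if_neg h, ih]
        have : (m < max (cnt + 1) (pvPeaks m rest (cnt + 1))) ↔ m < pvPeaks m rest (cnt + 1) := by
          omega
        simp [this]
    · exact ih 0

theorem pvPeaks_cons (m : Int) (c : Char) (l : List Char) (cnt : Int) :
    pvPeaks m (c :: l) cnt =
      if pvIsVowel c then max (cnt + 1) (pvPeaks m l (cnt + 1)) else pvPeaks m l 0 := rfl

theorem pvPeaks_run (m : Int) (t : List Char)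
    (ht : ∀ d ∈ t.head?, pvIsVowel d = false) (V : List Char) (cnt : Int)
    (hne : V ≠ [])
    (hV : ∀ c ∈ V, pvIsVowel c = true) :
    pvPeaks m (V ++ t) cnt = max (cnt + V.length) (pvPeaks m t 0) := by
  induction V generalizing cnt with
  | nil => exact absurd rfl hne
  | cons v V' ih =>
    have hv := hV v (by simp)
    cases V' with
    | nil =>
      simp only [List.singleton_append, pvPeaks, hv, if_pos, List.length_cons,
        List.length_nil]
      have : pvPeaks m t (cnt + 1) = pvPeaks m t 0 := by
        cases t with
        | nil => rfl
        | cons d t' =>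
          have hd := ht d (by simp)
          simp [pvPeaks, hd]
      rw [this]
      norm_num
    | cons v' V'' =>
      rw [List.cons_append, pvPeaks_cons, if_pos hv,
        ih (cnt + 1) (by simp) (fun c hc => hV c (by simp at hc ⊢; tauto))]
      simp only [List.length_cons]
      push_cast
      omega

theorem pvHead_dropWhile (p : Char → Bool) (l : List Char) :
    ∀ d ∈ (l.dropWhile p).head?, p d = false := by
  induction l with
  | nil => simp
  | cons c rest ih =>
    intro d hd
    by_cases hc : p c
    · rw [List.dropWhile_cons_of_pos hc] at hd
      exact ih d hd
    · rw [List.dropWhile_cons_of_neg hc] at hd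
      simp at hd
      subst hd
      simpa using hc

theorem pvPeaks_eq_runs (m : Int) (l : List Char) :
    pvPeaks m l 0 = pvMaxRuns m (pvRuns l) := by
  induction l using pvRuns.induct with
  | case1 => simp [pvPeaks, pvRuns, pvMaxRuns]
  | case2 c rest hc ih =>
    have hsplit : c :: rest =
        (c :: rest.takeWhile pvIsVowel) ++ rest.dropWhile pvIsVowel := by
      simp [List.takeWhile_append_dropWhile]
    conv_lhs => rw [hsplit]
    rw [pvPeaks_run m _ (pvHead_dropWhile pvIsVowel rest) _ 0 (by simp)
      (by
        intro x hx
        simp at hx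
        rcases hx with h | h
        · subst h; exact hc
        · exact List.mem_takeWhile_imp h)]
    rw [ih]
    rw [show pvRuns (c :: rest)
        = ((rest.takeWhile pvIsVowel).length + 1) :: pvRuns (rest.dropWhile pvIsVowel) from by
      rw [pvRuns.eq_def]; simp [hc]]
    simp [pvMaxRuns]
  | case3 c rest hc ih =>
    rw [pvPeaks_cons, if_neg (by simp [hc]), ih,
      show pvRuns (c :: rest) = pvRuns rest from by rw [pvRuns.eq_def]; simp [hc]]

theorem pvMaxRuns_lt (m : Int) (rs : List Nat) :
    decide (m < pvMaxRuns m rs) = rs.any (fun L => decide (m < (L : Int))) := by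
  induction rs with
  | nil => simp [pvMaxRuns]
  | cons r rs ih =>
    have hstep : pvMaxRuns m (r :: rs) = max ((r : Nat) : Int) (pvMaxRuns m rs) := rfl
    rw [List.any_cons, hstep, ← ih]
    by_cases h : m < (r : Int)
    · simp [h, lt_max_of_lt_left h]
    · have heq : (m < max ((r : Nat) : Int) (pvMaxRuns m rs)) ↔ m < pvMaxRuns m rs := by omega
      simp [heq, h]

-- ===== VERDICT (by name: the statement is the Claim_ definition above) =====
theorem check_consecutive_vowels_spec : Claim_equal_check_consecutive_vowels := by
  intro word m _
  unfold Spec_check_consecutive_vowels check_consecutive_vowels check_consecutive_vowels_alt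
  rw [pvLoopA_eq_peaks, pvPeaks_eq_runs, pvMaxRuns_lt]
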